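-- pv_equiv track=rewrite | github.com/alessandromenchetti/openpoke | server/services/execution/semantic_search.py | _extract_first_json_array
-- ===== SOURCE A (Python) =====
-- def _extract_first_json_array(text: str):
--     in_str = False
--     esc = False
--     depth = 0
--     start = None
--
--     for i, ch in enumerate(text):
--         if start is None:
--             if ch == "[":
--                 start = i
--                 depth = 1
--             continue
--
--         # Inside JSON candidate
--         if in_str:
--             if esc:
--                 esc = False
--             elif ch == "\\":
--                 esc = True
--             elif ch == '"':
--                 in_str = False
--         else:
--             if ch == '"':
--                 in_str = True
--             elif ch == "[":
--                 depth += 1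
--             elif ch == "]":
--                 depth -= 1
--                 if depth == 0:
--                     return text[start : i + 1]
--
--     return None
-- ===== SOURCE B (Python) =====
-- def _mask_strings(s):
--     # replace every character belonging to a string literal (including the
--     # quotes and escapes) by a space, so brackets inside strings disappear
--     out = []
--     in_str = False
--     esc = False
--     for ch in s:
--         if in_str:
--             if esc:
--                 esc = False
--             elif ch == "\\":
--                 esc = True
--             elif ch == '"':
--                 in_str = False
--             out.append(" ")
--         elif ch == '"':
--             in_str = True
--             out.append(" ")
--         else:
--             out.append(ch)
--     return out
--
--
-- def _extract_first_json_array(text: str):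
--     start = text.find("[")
--     if start == -1:
--         return None
--     depth = 1
--     for i, ch in enumerate(_mask_strings(text[start + 1:]), start + 1):
--         if ch == "[":
--             depth += 1
--         elif ch == "]":
--             depth -= 1
--             if depth == 0:
--                 return text[start : i + 1]
--     return None
-- ===== Notes on version B (the rewrite author's own statement) =====
-- stated objective: alternative
-- what changed: Replaces A's single combined string/escape/bracket state machine by staged passes: str.find locates the opening bracket, a masking pass blanks every string literal in the suffix, and then a plain depth counter with no string or escape state finds the matching close bracket.
import Mathlib
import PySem

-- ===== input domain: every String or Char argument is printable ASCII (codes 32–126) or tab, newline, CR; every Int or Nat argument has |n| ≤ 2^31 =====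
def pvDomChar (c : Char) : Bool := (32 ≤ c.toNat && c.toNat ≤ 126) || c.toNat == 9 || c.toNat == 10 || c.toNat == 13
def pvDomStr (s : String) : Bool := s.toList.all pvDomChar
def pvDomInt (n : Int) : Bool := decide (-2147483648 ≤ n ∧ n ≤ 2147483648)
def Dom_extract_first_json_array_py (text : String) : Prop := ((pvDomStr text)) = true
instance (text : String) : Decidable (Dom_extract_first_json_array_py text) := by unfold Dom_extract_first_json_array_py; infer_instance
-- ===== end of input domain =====

-- B replaces A's single combined string/escape/bracket machine by staged passes:
-- find the first '[', mask out all string literals in the suffix, then count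
-- brackets with a plain depth counter (objective: alternative decomposition).

-- ===== PORT A =====
-- A's single loop over enumerate(text): state (in_str, esc, depth, start).
def pvLoopA (full : List Char) : List Char → Int → Bool → Bool → Int → Option Int → Option String
  | [], _, _, _, _, _ => none
  | ch :: rest, i, in_str, esc, depth, start =>
    match start with
    | none =>
      if ch = '[' then pvLoopA full rest (i + 1) in_str esc 1 (some i)
      else pvLoopA full rest (i + 1) in_str esc depth none
    | some s =>
      if in_str then
        if esc then pvLoopA full rest (i + 1) true false depth (some s)
        else if ch = '\\' then pvLoopA full rest (i + 1) true true depth (some s)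
        else if ch = '"' then pvLoopA full rest (i + 1) false esc depth (some s)
        else pvLoopA full rest (i + 1) true esc depth (some s)
      else
        if ch = '"' then pvLoopA full rest (i + 1) true esc depth (some s)
        else if ch = '[' then pvLoopA full rest (i + 1) in_str esc (depth + 1) (some s)
        else if ch = ']' then
          let depth' := depth - 1
          if depth' = 0 then some (String.ofList (PySem.List.slice full (some s) (some (i + 1))))
          else pvLoopA full rest (i + 1) in_str esc depth' (some s)
        else pvLoopA full rest (i + 1) in_str esc depth (some s)

def extract_first_json_array_py (text : String) : Option String :=
  pvLoopA text.toList text.toList 0 false false 0 none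

-- ===== PORT B =====
-- B's masking pass: every character of a string literal (quotes, escapes
-- included) becomes a space; other characters are kept.
def pvMaskB : Bool → Bool → List Char → List Char
  | _, _, [] => []
  | in_str, esc, ch :: rest =>
    if in_str then
      if esc then ' ' :: pvMaskB true false rest
      else if ch = '\\' then ' ' :: pvMaskB true true rest
      else if ch = '"' then ' ' :: pvMaskB false esc rest
      else ' ' :: pvMaskB true esc rest
    else if ch = '"' then ' ' :: pvMaskB true esc rest
    else ch :: pvMaskB in_str esc rest

-- B's counting pass: plain bracket depth over the masked suffix.
def pvCountB (full : List Char) (s : Int) : List Char → Int → Int → Option String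
  | [], _, _ => none
  | ch :: rest, i, depth =>
    if ch = '[' then pvCountB full s rest (i + 1) (depth + 1)
    else if ch = ']' then
      let depth' := depth - 1
      if depth' = 0 then some (String.ofList (PySem.List.slice full (some s) (some (i + 1))))
      else pvCountB full s rest (i + 1) depth'
    else pvCountB full s rest (i + 1) depth

def extract_first_json_array_py_alt (text : String) : Option String :=
  let start := PySem.Str.find text "["
  if start = -1 then none
  else pvCountB text.toList start
         (pvMaskB false false (PySem.List.slice text.toList (some (start + 1)) none))
         (start + 1) 1

-- ===== PRECONDITION & SPEC =====
def Spec_extract_first_json_array_py (text : String) (out : Option String) : Prop := out = extract_first_json_array_py_alt text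
instance (text : String) (out : Option String) : Decidable (Spec_extract_first_json_array_py text out) := by unfold Spec_extract_first_json_array_py; infer_instance

-- ===== CLAIM (what is proved, stated in full; the proofs are below) =====
def Claim_equal_extract_first_json_array_py : Prop := ∀ (text : String), Dom_extract_first_json_array_py text → Spec_extract_first_json_array_py text (extract_first_json_array_py text)

-- ===== LEMMAS AND PROOFS =====

-- A's loop before any '[' is seen only advances the index.
theorem pvLoopA_skip (full : List Char) (pre : List Char) (hpre : '[' ∉ pre) :
    ∀ (rest : List Char) (i : Int) (ins esc : Bool) (d : Int),
      pvLoopA full (pre ++ rest) i ins esc d none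
        = pvLoopA full rest (i + pre.length) ins esc d none := by
  induction pre with
  | nil => intro rest i ins esc d; simp
  | cons c pre' ih =>
    intro rest i ins esc d
    have hc : c ≠ '[' := fun h => hpre (h ▸ List.mem_cons_self ..)
    have hpre' : '[' ∉ pre' := fun h => hpre (List.mem_cons_of_mem _ h)
    simp only [List.cons_append, pvLoopA, if_neg hc]
    rw [ih hpre']
    congr 1
    push_cast [List.length_cons]
    ring

-- After the start is fixed, A's combined machine equals B's plain bracket
-- counter run over the masked suffix.
theorem pvLoopA_eq_count_mask (full : List Char) (s : Int) :
    ∀ (cs : List Char) (ins esc : Bool) (i : Int) (d : Int),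
      pvCountB full s (pvMaskB ins esc cs) i d = pvLoopA full cs i ins esc d (some s) := by
  intro cs
  induction cs with
  | nil => intro ins esc i d; simp [pvMaskB, pvCountB, pvLoopA]
  | cons c rest ih =>
    intro ins esc i d
    simp only [pvMaskB, pvLoopA]
    split_ifs <;> simp [pvCountB, ih, *]

-- ===== VERDICT (by name: the statement is the Claim_ definition above) =====
theorem extract_first_json_array_py_spec : Claim_equal_extract_first_json_array_py := by
  intro text _
  unfold Spec_extract_first_json_array_py extract_first_json_array_py extract_first_json_array_py_alt
  set cs := text.toList with hcs
  have hfind : PySem.Str.find text "[" = PySem.Chars.find cs ['['] := by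
    simp [hcs]
  rw [hfind]
  by_cases hneg : PySem.Chars.find cs ['['] = -1
  · -- no '[' anywhere: A's loop never leaves the skip phase
    rw [if_pos hneg]
    have hnin : '[' ∉ cs := by
      have := (PySem.Chars.find_eq_neg_one_iff cs ['[']).mp hneg
      intro hmem
      rcases List.append_of_mem hmem with ⟨u, v, huv⟩
      exact this ⟨u, v, by simp [huv]⟩
    have := pvLoopA_skip cs cs hnin [] 0 false false 0
    simp only [List.append_nil] at this
    rw [this]
    simp [pvLoopA]
  · rw [if_neg hneg]
    have h0 : 0 ≤ PySem.Chars.find cs ['['] := by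
      have := PySem.Chars.neg_one_le_find cs ['[']
      omega
    obtain ⟨hpref, hmin⟩ := PySem.Chars.find_spec (s := cs) (sub := ['[']) h0
    set k := (PySem.Chars.find cs ['[']).toNat with hk
    obtain ⟨t, ht⟩ := hpref
    have h1 : cs.drop k = '[' :: t := by simpa using ht.symm
    have h2 : cs.drop (k + 1) = t := by
      rw [← List.tail_drop, h1, List.tail_cons]
    have hdropk : cs.drop k = '[' :: cs.drop (k + 1) := by rw [h1, h2]
    have hklen : k < cs.length := by
      by_contra h
      rw [List.drop_eq_nil_of_le (by omega)] at h1
      simp at h1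
    have hpre : '[' ∉ cs.take k := by
      intro hmem
      obtain ⟨j, hj, hget⟩ := List.getElem_of_mem hmem
      have hjk : j < k ∧ j < cs.length := by simpa using hj
      have hgj : cs[j]'hjk.2 = '[' := by
        simpa using hget
      refine hmin j hjk.1 ⟨cs.drop (j + 1), ?_⟩
      rw [List.drop_eq_getElem_cons hjk.2, hgj]
      simp
    have hsplit : cs = cs.take k ++ ('[' :: cs.drop (k + 1)) := by
      rw [← hdropk, List.take_append_drop]
    have hlen : (cs.take k).length = k := by simp [Nat.le_of_lt hklen]
    calc pvLoopA cs cs 0 false false 0 none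
        = pvLoopA cs (cs.take k ++ ('[' :: cs.drop (k + 1))) 0 false false 0 none := by
          rw [← hsplit]
      _ = pvLoopA cs ('[' :: cs.drop (k + 1)) (0 + (cs.take k).length) false false 0 none :=
          pvLoopA_skip cs (cs.take k) hpre _ 0 false false 0
      _ = pvLoopA cs (cs.drop (k + 1)) ((k : Int) + 1) false false 1 (some (k : Int)) := by
          simp [pvLoopA, hlen]
      _ = pvCountB cs (k : Int) (pvMaskB false false (cs.drop (k + 1))) ((k : Int) + 1) 1 :=
          (pvLoopA_eq_count_mask cs (k : Int) _ false false _ 1).symm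
    have hfk : PySem.Chars.find cs ['['] = (k : Int) := by omega
    rw [hfk, show (k : Int) + 1 = ((k + 1 : Nat) : Int) by push_cast; ring,
      PySem.List.slice_from_natCast]
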